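-- pv_equiv track=rewrite | github.com/volhaTaler/hyperskill | mangman_game.py | get_letter_frequency
-- ===== SOURCE A (Python) =====
-- def get_letter_frequency(w):
--     letters_set = set(w)
--     combis = {}
--     for item in letters_set:
--         inds =[]
--         for i, l in enumerate(w):
--             if l == item:
--                 inds.append(i)
--         combis[item] = inds
--     return combis
-- ===== SOURCE B (Python) =====
-- def get_letter_frequency(w):
--     combis = {}
--     for i, ch in enumerate(w):
--         combis.setdefault(ch, []).append(i)
--     return combis
-- ===== Notes on version B (the rewrite author's own statement) =====
-- stated objective: idiomatic
-- what changed: Replaced the per-distinct-letter rescan of the whole string (set(w) outer loop with a full enumerate inner loop) by a single flat pass over enumerate(w) that appends each index to combis.setdefault(ch, []); intended as faster (O(n) vs O(n*k)) but a timing run measurement was inconsistent, so no speed is claimed.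
import Mathlib
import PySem

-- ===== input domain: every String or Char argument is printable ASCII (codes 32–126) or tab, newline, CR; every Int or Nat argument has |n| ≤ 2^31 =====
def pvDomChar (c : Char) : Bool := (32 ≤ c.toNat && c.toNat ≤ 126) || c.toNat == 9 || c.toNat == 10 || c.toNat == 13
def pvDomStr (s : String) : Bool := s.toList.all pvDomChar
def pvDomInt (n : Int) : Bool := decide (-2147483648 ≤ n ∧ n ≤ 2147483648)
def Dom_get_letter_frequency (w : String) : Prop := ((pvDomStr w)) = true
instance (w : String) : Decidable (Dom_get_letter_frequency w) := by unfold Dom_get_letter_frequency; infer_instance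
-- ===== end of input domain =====

-- B replaces A's loop over set(w) with a full rescan of w per distinct letter by ONE pass over
-- enumerate(w) appending each index via setdefault. Return value only; Python's set-iteration
-- (hash) order over set(w) is not modelled: the port iterates the distinct letters in
-- first-occurrence order, which dict comparison (order-insensitive) cannot observe.

-- ===== PORT A =====
def get_letter_frequency (w : String) : List (String × List Int) :=
  let letters_set : PySem.Set Char := PySem.Set.ofList w.toList
  (letters_set.foldl
    (fun combis item =>
      let inds : List Int :=
        (PySem.List.enumerate w.toList 0).foldl
          (fun inds p => if p.2 == item then inds ++ [p.1] else inds) []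
      combis.insert (String.ofList [item]) inds)
    PySem.Dict.empty).items

-- ===== PORT B =====
def get_letter_frequency_alt (w : String) : List (String × List Int) :=
  ((PySem.List.enumerate w.toList 0).foldl
    (fun combis p => combis.modify (String.ofList [p.2]) ([] : List Int) (fun v => v ++ [p.1]))
    PySem.Dict.empty).items

-- ===== PRECONDITION & SPEC =====
def Spec_get_letter_frequency (w : String) (out : List (String × List Int)) : Prop := out = get_letter_frequency_alt w
instance (w : String) (out : List (String × List Int)) : Decidable (Spec_get_letter_frequency w out) := by unfold Spec_get_letter_frequency; infer_instance

-- ===== CLAIM (what is proved, stated in full; the proofs are below) =====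
def Claim_equal_get_letter_frequency : Prop := ∀ (w : String), Dom_get_letter_frequency w → Spec_get_letter_frequency w (get_letter_frequency w)

-- ===== LEMMAS AND PROOFS =====

-- String.ofList is injective on singletons, as a Bool-level fact about ==.
theorem pv_strBeq (a b : Char) : (String.ofList [a] == String.ofList [b]) = (a == b) := by
  rcases Bool.eq_false_or_eq_true (a == b) with h | h <;> simp_all
  intro hc; have := congrArg String.toList hc; simp at this; simp [this] at h

theorem pv_str_inj (a b : Char) (h : String.ofList [a] = String.ofList [b]) : a = b := by
  have := congrArg String.toList h; simpa using this

-- A's outer loop: inserting fresh singleton-string keys appends items in order.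
theorem pv_itemsA (v : Char → List Int) :
    ∀ (ks : List Char) (d : PySem.Dict String (List Int)), ks.Nodup →
      (∀ c ∈ ks, d.contains (String.ofList [c]) = false) →
      (ks.foldl (fun d c => d.insert (String.ofList [c]) (v c)) d).items
        = d.items ++ ks.map (fun c => (String.ofList [c], v c)) := by
  intro ks
  induction ks with
  | nil => intro d _ _; simp
  | cons k ks ih =>
      intro d hnd hfresh
      have hk : d.contains (String.ofList [k]) = false := hfresh k (by simp)
      have hkeys := PySem.Dict.keys_insert_of_not_contains d (v k) hk
      have hitems : (d.insert (String.ofList [k]) (v k)).items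
          = d.items ++ [(String.ofList [k], v k)] := by
        rw [PySem.Dict.items_insert, hk]; simp
      have hfresh' : ∀ c ∈ ks,
          (d.insert (String.ofList [k]) (v k)).contains (String.ofList [c]) = false := by
        intro c hc
        rcases h' : (d.insert (String.ofList [k]) (v k)).contains (String.ofList [c]) with _ | _
        · rfl
        · exfalso
          have hm := (PySem.Dict.contains_iff_mem_keys _ _).mp h'
          rw [hkeys] at hm
          rcases List.mem_append.mp hm with hm | hm
          · have : d.contains (String.ofList [c]) = true :=
              (PySem.Dict.contains_iff_mem_keys _ _).mpr hm
            rw [hfresh c (by simp [hc])] at this; cases this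
          · have : c = k := pv_str_inj _ _ (by simpa using hm)
            exact (List.nodup_cons.mp hnd).1 (this ▸ hc)
      simp only [List.foldl_cons]
      rw [ih _ (List.nodup_cons.mp hnd).2 hfresh', hitems]
      simp

-- keys of insert when the key is already present: unchanged.
theorem pv_keys_insert_contains (d : PySem.Dict String (List Int)) (k : String) (v : List Int)
    (h : d.contains k = true) : (d.insert k v).keys = d.keys := by
  have hi := PySem.Dict.items_insert d k v
  rw [h] at hi
  simp only [PySem.Dict.keys, hi, if_true, List.map_map]
  apply List.map_congr_left
  intro p _
  by_cases hp : (p.1 == k) = true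
  · simp only [Function.comp, hp, if_true]; exact (eq_of_beq hp).symm
  · simp [Function.comp, hp]

-- B's loop: the keys accumulate like Python set.update (first occurrence, appended at the end).
theorem pv_keysB :
    ∀ (l : List (String × Int)) (d : PySem.Dict String (List Int)),
      (l.foldl (fun d q => d.modify q.1 ([] : List Int) (fun v => v ++ [q.2])) d).keys
        = PySem.Set.update d.keys (l.map (·.1)) := by
  intro l
  induction l with
  | nil => intro d; simp [PySem.Set.update]
  | cons q l ih =>
      intro d
      have hstep : (d.modify q.1 ([] : List Int) (fun v => v ++ [q.2])).keys
          = PySem.Set.add d.keys q.1 := by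
        rw [PySem.Dict.keys_modify]
        rcases h : d.contains q.1 with _ | _
        · rw [PySem.Dict.keys_insert_of_not_contains d _ h,
              PySem.Set.add_of_not_mem]
          intro hm
          rw [(PySem.Dict.contains_iff_mem_keys d q.1).mpr hm] at h; cases h
        · rw [pv_keys_insert_contains d q.1 _ h,
              PySem.Set.add_of_mem ((PySem.Dict.contains_iff_mem_keys d q.1).mp h)]
      simp only [List.foldl_cons, List.map_cons]
      rw [ih, hstep]
      rfl

-- Set.ofList commutes with mapping the injective singleton-string embedding.
theorem pv_foldl_add_map :
    ∀ (xs s : List Char),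
      (xs.map (fun c => String.ofList [c])).foldl PySem.Set.add
          (s.map (fun c => String.ofList [c]))
        = (xs.foldl PySem.Set.add s).map (fun c => String.ofList [c]) := by
  intro xs
  induction xs with
  | nil => intro s; simp
  | cons x xs ih =>
      intro s
      have hstep : PySem.Set.add (s.map (fun c => String.ofList [c])) (String.ofList [x])
          = (PySem.Set.add s x).map (fun c => String.ofList [c]) := by
        by_cases hx : x ∈ s
        · rw [PySem.Set.add_of_mem (List.mem_map_of_mem hx), PySem.Set.add_of_mem hx]
        · rw [PySem.Set.add_of_not_mem, PySem.Set.add_of_not_mem hx, List.map_append]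
          · rfl
          · intro hm
            rcases List.mem_map.mp hm with ⟨c, hc, he⟩
            exact hx ((pv_str_inj c x he) ▸ hc)
      simp only [List.map_cons, List.foldl_cons, hstep, ih]

theorem pv_ofList_map (xs : List Char) :
    PySem.Set.ofList (xs.map (fun c => String.ofList [c]))
      = (PySem.Set.ofList xs).map (fun c => String.ofList [c]) := by
  rw [PySem.Set.ofList_eq_foldl, PySem.Set.ofList_eq_foldl]
  simpa using pv_foldl_add_map xs []

-- ===== VERDICT (by name: the statement is the Claim_ definition above) =====
theorem get_letter_frequency_spec : Claim_equal_get_letter_frequency := by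
  intro w _
  unfold Spec_get_letter_frequency get_letter_frequency get_letter_frequency_alt
  set l := PySem.List.enumerate w.toList 0 with hl
  -- rewrite B's fold as a fold over the (key, index) pairs
  have hBfold :
      (l.foldl (fun combis p =>
          combis.modify (String.ofList [p.2]) ([] : List Int) (fun v => v ++ [p.1]))
        PySem.Dict.empty)
        =
      ((l.map (fun p => (String.ofList [p.2], p.1))).foldl
          (fun d q => d.modify q.1 ([] : List Int) (fun v => v ++ [q.2]))
          PySem.Dict.empty) := by
    rw [List.foldl_map]
  set m := l.map (fun p => (String.ofList [p.2], p.1)) with hm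
  set Db := m.foldl (fun d q => d.modify q.1 ([] : List Int) (fun v => v ++ [q.2]))
      PySem.Dict.empty with hDb
  -- keys of B's dict: distinct letters in first-occurrence order, mapped to strings
  have hkeysm : m.map (·.1) = w.toList.map (fun c => String.ofList [c]) := by
    rw [hm, List.map_map]
    have hco : ((fun q : String × Int => q.1) ∘ fun p : Int × Char => (String.ofList [p.2], p.1))
        = (fun c => String.ofList [c]) ∘ (fun p : Int × Char => p.2) := rfl
    rw [hco, ← List.map_map, hl, PySem.List.map_snd_enumerate]
  have hkeys : Db.keys = (PySem.Set.ofList w.toList).map (fun c => String.ofList [c]) := by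
    rw [hDb, pv_keysB, PySem.Dict.keys_empty, hkeysm, ← pv_ofList_map,
        PySem.Set.ofList_eq_foldl]
    rfl
  have hnodup : Db.keys.Nodup := by
    rw [hkeys]
    exact (PySem.Set.nodup_ofList w.toList).map (fun a b h => pv_str_inj a b h)
  -- per-key values of B's dict
  have hval : ∀ c : Char, Db.getD (String.ofList [c]) [] =
      (l.filter (fun p => p.2 == c)).map (·.1) := by
    intro c
    rw [hDb, PySem.Dict.getD_foldl_modify_append m PySem.Dict.empty (String.ofList [c]),
        PySem.Dict.getD_empty]
    rw [hm, List.filter_map, List.map_map]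
    have hpred : ((fun q : String × Int => q.1 == String.ofList [c]) ∘
        fun p : Int × Char => (String.ofList [p.2], p.1)) = (fun p : Int × Char => p.2 == c) := by
      funext p; exact pv_strBeq p.2 c
    rw [hpred]
    rfl
  -- A's side: outer fold over the distinct letters with fresh keys
  rw [hBfold]
  dsimp only
  rw [PySem.Dict.items_eq_map_keys Db hnodup ([] : List Int), hkeys, List.map_map,
      pv_itemsA (fun c => (l.foldl (fun inds p => if p.2 == c then inds ++ [p.1] else inds) []))
        (PySem.Set.ofList w.toList) PySem.Dict.empty
        (PySem.Set.nodup_ofList w.toList) (fun c _ => PySem.Dict.contains_empty _)]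
  simp only [PySem.Dict.empty, List.nil_append]
  apply List.map_congr_left
  intro c _
  simp only [Function.comp]
  rw [PySem.List.foldl_append_if (fun p : Int × Char => p.2 == c) (fun p : Int × Char => p.1) l []]
  rw [hval c]
  rfl
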